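-- pv_equiv track=rewrite | github.com/lpchambers/aoc19 | day22/p12.py | polypow
-- ===== SOURCE A (Python) =====
-- def polypow(a, b, p, ncards):
--     if p==0:
--         return 1, 0
--     elif p%2==0:
--         return polypow(a*a%ncards, (a*b+b)%ncards, p//2, ncards)
--     else:
--         c, d = polypow(a, b, p-1, ncards)
--         return a*c%ncards, (a*d+b)%ncards
-- ===== SOURCE B (Python) =====
-- def polypow(a, b, p, ncards):
--     ra, rb = 1, 0
--     ba, bb = a, b
--     while p > 0:
--         if p % 2 == 1:
--             ra, rb = ba * ra % ncards, (ba * rb + bb) % ncards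
--         ba, bb = ba * ba % ncards, (ba * bb + bb) % ncards
--         p //= 2
--     return ra, rb
-- ===== Notes on version B (the rewrite author's own statement) =====
-- stated objective: alternative
-- what changed: Replaced A's recursive even/odd exponentiation with an iterative square-and-multiply loop over the bits of p that maintains a (result, base) pair of affine maps and composes them modulo ncards.
import Mathlib
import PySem

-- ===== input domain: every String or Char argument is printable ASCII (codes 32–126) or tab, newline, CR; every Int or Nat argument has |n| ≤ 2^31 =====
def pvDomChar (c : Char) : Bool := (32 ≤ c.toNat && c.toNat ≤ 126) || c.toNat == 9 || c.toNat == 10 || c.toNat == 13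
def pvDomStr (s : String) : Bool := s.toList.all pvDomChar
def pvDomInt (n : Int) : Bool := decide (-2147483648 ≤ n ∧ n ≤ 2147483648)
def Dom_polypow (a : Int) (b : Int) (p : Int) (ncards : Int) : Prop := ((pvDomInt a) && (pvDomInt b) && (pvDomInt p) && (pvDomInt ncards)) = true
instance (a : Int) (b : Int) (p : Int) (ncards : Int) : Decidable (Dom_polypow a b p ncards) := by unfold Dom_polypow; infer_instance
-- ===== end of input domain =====

-- B replaces A's recursion by an iterative square-and-multiply loop over the bits of p
-- (objective: alternative; same asymptotic cost, no recursion).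

-- ===== PORT A =====
-- literal transliteration of A; the `p < 0` guard only makes the recursion total
-- (Python recurses forever there; those inputs are outside Pre_polypow)
def polypow (a : Int) (b : Int) (p : Int) (ncards : Int) : Int × Int :=
  if p = 0 then (1, 0)
  else if p < 0 then (1, 0)
  else if PySem.Int.mod p 2 = 0 then
    polypow (PySem.Int.mod (a * a) ncards) (PySem.Int.mod (a * b + b) ncards)
      (PySem.Int.floordiv p 2) ncards
  else
    let cd := polypow a b (p - 1) ncards
    (PySem.Int.mod (a * cd.1) ncards, PySem.Int.mod (a * cd.2 + b) ncards)
termination_by p.toNat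
decreasing_by
  · have h : PySem.Int.floordiv p 2 = p / 2 := PySem.Int.floordiv_eq_ediv_of_pos (by omega)
    rw [h]; omega
  · omega

-- ===== PORT B =====
-- the while-loop of Source B as a tail recursion over the same state (ra, rb, ba, bb, p)
def polypowLoop (ra rb ba bb p ncards : Int) : Int × Int :=
  if 0 < p then
    let r' : Int × Int :=
      if PySem.Int.mod p 2 = 1
      then (PySem.Int.mod (ba * ra) ncards, PySem.Int.mod (ba * rb + bb) ncards)
      else (ra, rb)
    polypowLoop r'.1 r'.2 (PySem.Int.mod (ba * ba) ncards)
      (PySem.Int.mod (ba * bb + bb) ncards) (PySem.Int.floordiv p 2) ncards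
  else (ra, rb)
termination_by p.toNat
decreasing_by
  have h : PySem.Int.floordiv p 2 = p / 2 := PySem.Int.floordiv_eq_ediv_of_pos (by omega)
  rw [h]; omega

def polypow_alt (a : Int) (b : Int) (p : Int) (ncards : Int) : Int × Int :=
  polypowLoop 1 0 a b p ncards

-- ===== PRECONDITION & SPEC =====
-- Pre_ excludes only inputs where Python A raises: p < 0 (infinite recursion →
-- RecursionError) and ncards = 0 with p > 0 (ZeroDivisionError).
def Pre_polypow (a : Int) (b : Int) (p : Int) (ncards : Int) : Prop :=
  0 ≤ p ∧ (ncards ≠ 0 ∨ p = 0)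
instance (a : Int) (b : Int) (p : Int) (ncards : Int) : Decidable (Pre_polypow a b p ncards) := by
  unfold Pre_polypow; infer_instance

def pvWitness_polypow : Int × Int × Int × Int := (7, 3, 12, 10)

def Spec_polypow (a : Int) (b : Int) (p : Int) (ncards : Int) (out : Int × Int) : Prop := out = polypow_alt a b p ncards
instance (a : Int) (b : Int) (p : Int) (ncards : Int) (out : Int × Int) : Decidable (Spec_polypow a b p ncards out) := by unfold Spec_polypow; infer_instance

-- ===== CLAIM (what is proved, stated in full; the proofs are below) =====
def Claim_equal_polypow : Prop := ∀ (a : Int) (b : Int) (p : Int) (ncards : Int), Dom_polypow a b p ncards → Pre_polypow a b p ncards → Spec_polypow a b p ncards (polypow a b p ncards)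

-- ===== LEMMAS AND PROOFS =====

-- geometric sum 1 + a + … + a^(k-1)
def geom (a : Int) : Nat → Int
  | 0 => 0
  | k + 1 => geom a k + a ^ k

theorem geom_succ' (a : Int) (k : Nat) : geom a (k + 1) = 1 + a * geom a k := by
  induction k with
  | zero => simp [geom]
  | succ k ih =>
    show geom a (k + 1) + a ^ (k + 1) = 1 + a * (geom a k + a ^ k)
    rw [ih, pow_succ]; ring

theorem pow_two_mul' (a : Int) (m : Nat) : a ^ (2 * m) = (a * a) ^ m := by
  rw [two_mul, pow_add, mul_pow]

theorem geom_double (a : Int) (m : Nat) : geom a (2 * m) = (1 + a) * geom (a * a) m := by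
  induction m with
  | zero => simp [geom]
  | succ m ih =>
    have h2 : 2 * (m + 1) = (2 * m + 1) + 1 := by ring
    rw [h2]
    show geom a (2 * m + 1) + a ^ (2 * m + 1) = (1 + a) * geom (a * a) (m + 1)
    show geom a (2 * m) + a ^ (2 * m) + a ^ (2 * m + 1) = (1 + a) * geom (a * a) (m + 1)
    rw [ih]
    show _ = (1 + a) * (geom (a * a) m + (a * a) ^ m)
    rw [pow_succ, pow_two_mul']; ring

theorem fmod_congr {n x y : Int} (h : x ≡ y [ZMOD n]) : x.fmod n = y.fmod n := by
  obtain ⟨k, hk⟩ := (Int.modEq_iff_dvd.mp h)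
  have hy : y = x + n * k := by linarith
  rw [hy, Int.add_mul_fmod_self_left]

theorem fmod_modEq (x n : Int) : x.fmod n ≡ x [ZMOD n] := by
  have := Int.fmod_def x n
  exact Int.modEq_iff_dvd.mpr ⟨x.fdiv n, by linarith⟩

theorem geom_congr {n a a' : Int} (h : a ≡ a' [ZMOD n]) (k : Nat) :
    geom a k ≡ geom a' k [ZMOD n] := by
  induction k with
  | zero => rfl
  | succ k ih =>
    show geom a k + a ^ k ≡ geom a' k + a' ^ k [ZMOD n]
    exact ih.add (h.pow k)

theorem cast_natCast_eq (m q : Nat) (h : m = q) : (m : Int) = (q : Int) := by exact_mod_cast h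

-- A computes (a^m % n, b·geom a m % n) for m ≥ 1
theorem polypow_closed (n : Int) :
    ∀ m : Nat, 1 ≤ m → ∀ a b : Int,
      polypow a b (m : Int) n = ((a ^ m).fmod n, (b * geom a m).fmod n) := by
  intro m
  induction m using Nat.strong_induction_on with
  | _ m ih =>
    intro hm a b
    rw [polypow]
    have hm0 : ¬ ((m : Int) = 0) := by exact_mod_cast Nat.one_le_iff_ne_zero.mp hm
    have hmlt : ¬ ((m : Int) < 0) := not_lt.mpr (Int.natCast_nonneg m)
    simp only [hm0, hmlt, if_false]
    rcases Nat.even_or_odd m with ⟨q, hq⟩ | ⟨q, hq⟩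
    · -- m = 2q even, q ≥ 1
      have hm2 : m = 2 * q := by omega
      have hq1 : 1 ≤ q := by omega
      have hceq : (m : Int) = ((2 * q : Nat) : Int) := cast_natCast_eq _ _ hm2
      have hc2 : ((2 : Nat) : Int) = (2 : Int) := by norm_num
      have hmod : PySem.Int.mod (m : Int) 2 = 0 := by
        rw [hceq, ← hc2, PySem.Int.mod_natCast]; norm_num [Nat.mul_mod_right]
      have hdiv : PySem.Int.floordiv (m : Int) 2 = ((q : Nat) : Int) := by
        rw [hceq, ← hc2, PySem.Int.floordiv_natCast]; norm_num
      simp only [hmod, hdiv, eq_self_iff_true, if_true]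
      rw [ih q (by omega) hq1]
      simp only [Prod.mk.injEq]
      constructor
      · apply fmod_congr
        calc ((a * a).fmod n) ^ q ≡ (a * a) ^ q [ZMOD n] := (fmod_modEq _ n).pow q
          _ = a ^ m := by rw [hm2, pow_two_mul']
      · apply fmod_congr
        calc ((a * b + b).fmod n) * geom ((a * a).fmod n) q
            ≡ (a * b + b) * geom (a * a) q [ZMOD n] :=
              (fmod_modEq _ n).mul (geom_congr (fmod_modEq _ n) q)
          _ = b * geom a m := by rw [hm2, geom_double]; ring
    · -- m = 2q + 1 odd
      have hm2 : m = 2 * q + 1 := by omega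
      have hceq : (m : Int) = ((2 * q + 1 : Nat) : Int) := cast_natCast_eq _ _ hm2
      have hc2 : ((2 : Nat) : Int) = (2 : Int) := by norm_num
      have hmod : ¬ PySem.Int.mod (m : Int) 2 = 0 := by
        rw [hceq, ← hc2, PySem.Int.mod_natCast]
        have h1 : (2 * q + 1) % 2 = 1 := by omega
        rw [h1]; norm_num
      simp only [hmod, if_false]
      rcases Nat.eq_or_lt_of_le hm with h1 | h1
      · -- m = 1 : the inner call is at exponent 0
        have hm1 : m = 1 := h1.symm
        subst hm1
        have h0 : ((1 : Nat) : Int) - 1 = 0 := by norm_num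
        rw [h0, polypow]
        norm_num [PySem.Int.mod, geom]
      · -- m ≥ 2 : the inner call is at exponent m - 1 ≥ 1
        obtain ⟨k, rfl⟩ : ∃ k, m = k + 1 := ⟨m - 1, by omega⟩
        have hcast : ((k + 1 : Nat) : Int) - 1 = ((k : Nat) : Int) := by push_cast; ring
        rw [hcast, ih k (by omega) (by omega) a b]
        simp only [Prod.mk.injEq]
        constructor
        · apply fmod_congr
          calc a * ((a ^ k).fmod n) ≡ a * a ^ k [ZMOD n] :=
                (Int.ModEq.refl a).mul (fmod_modEq _ n)
            _ = a ^ (k + 1) := by rw [pow_succ]; ring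
        · apply fmod_congr
          calc a * ((b * geom a k).fmod n) + b
              ≡ a * (b * geom a k) + b [ZMOD n] :=
                ((Int.ModEq.refl a).mul (fmod_modEq _ n)).add (Int.ModEq.refl b)
            _ = b * geom a (k + 1) := by rw [geom_succ']; ring

-- B's loop invariant: the final map is (base)^m composed after (ra, rb)
theorem polypowLoop_closed (n : Int) :
    ∀ m : Nat, 1 ≤ m → ∀ ra rb ba bb : Int,
      polypowLoop ra rb ba bb (m : Int) n =
        ((ba ^ m * ra).fmod n, (ba ^ m * rb + bb * geom ba m).fmod n) := by
  intro m
  induction m using Nat.strong_induction_on with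
  | _ m ih =>
    intro hm ra rb ba bb
    rw [polypowLoop]
    have hpos : (0 : Int) < (m : Int) := by exact_mod_cast hm
    simp only [hpos, if_true]
    rcases Nat.eq_or_lt_of_le hm with h1 | h1
    · -- m = 1 : one multiply step, then the loop exits at p = 0
      have hm1 : m = 1 := h1.symm
      subst hm1
      have e1 : PySem.Int.mod (1 : Int) 2 = 1 := by decide
      have e2 : PySem.Int.floordiv (1 : Int) 2 = 0 := by decide
      simp only [Nat.cast_one, e1, e2, eq_self_iff_true, if_true]
      rw [polypowLoop]
      norm_num [PySem.Int.mod, geom]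
    · -- m ≥ 2
      have hdiv : PySem.Int.floordiv (m : Int) 2 = ((m / 2 : Nat) : Int) := by
        exact_mod_cast PySem.Int.floordiv_natCast m 2
      rcases Nat.even_or_odd m with ⟨q, hq⟩ | ⟨q, hq⟩
      · -- m = 2q even: the bit is 0, result pair unchanged
        have hm2 : m = 2 * q := by omega
        have hq1 : 1 ≤ q := by omega
        have hc2 : ((2 : Nat) : Int) = (2 : Int) := by norm_num
        have hmod : ¬ PySem.Int.mod (m : Int) 2 = 1 := by
          rw [cast_natCast_eq _ _ hm2, ← hc2, PySem.Int.mod_natCast]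
          norm_num [Nat.mul_mod_right]
        have hq2 : m / 2 = q := by omega
        rw [hdiv, hq2]
        simp only [hmod, if_false]
        rw [ih q (by omega) hq1]
        simp only [Prod.mk.injEq]
        constructor
        · apply fmod_congr
          calc ((ba * ba).fmod n) ^ q * ra ≡ (ba * ba) ^ q * ra [ZMOD n] :=
                ((fmod_modEq _ n).pow q).mul (Int.ModEq.refl ra)
            _ = ba ^ m * ra := by rw [hm2, pow_two_mul']
        · apply fmod_congr
          calc ((ba * ba).fmod n) ^ q * rb + ((ba * bb + bb).fmod n) * geom ((ba * ba).fmod n) q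
              ≡ (ba * ba) ^ q * rb + (ba * bb + bb) * geom (ba * ba) q [ZMOD n] :=
                (((fmod_modEq _ n).pow q).mul (Int.ModEq.refl rb)).add
                  ((fmod_modEq _ n).mul (geom_congr (fmod_modEq _ n) q))
            _ = ba ^ m * rb + bb * geom ba m := by
                rw [hm2, pow_two_mul', geom_double]; ring
      · -- m = 2q + 1 odd: the bit is 1, multiply into the result pair
        have hm2 : m = 2 * q + 1 := by omega
        have hq1 : 1 ≤ q := by omega
        have hc2 : ((2 : Nat) : Int) = (2 : Int) := by norm_num
        have hmod : PySem.Int.mod (m : Int) 2 = 1 := by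
          rw [cast_natCast_eq _ _ hm2, ← hc2, PySem.Int.mod_natCast]
          have h1 : (2 * q + 1) % 2 = 1 := by omega
          rw [h1]; norm_num
        have hq2 : m / 2 = q := by omega
        rw [hdiv, hq2]
        simp only [hmod, eq_self_iff_true, if_true]
        rw [ih q (by omega) hq1]
        simp only [Prod.mk.injEq]
        constructor
        · apply fmod_congr
          calc ((ba * ba).fmod n) ^ q * ((ba * ra).fmod n)
              ≡ (ba * ba) ^ q * (ba * ra) [ZMOD n] :=
                ((fmod_modEq _ n).pow q).mul (fmod_modEq _ n)
            _ = ba ^ m * ra := by rw [hm2, pow_succ, pow_two_mul']; ring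
        · apply fmod_congr
          calc ((ba * ba).fmod n) ^ q * ((ba * rb + bb).fmod n)
                + ((ba * bb + bb).fmod n) * geom ((ba * ba).fmod n) q
              ≡ (ba * ba) ^ q * (ba * rb + bb) + (ba * bb + bb) * geom (ba * ba) q [ZMOD n] :=
                (((fmod_modEq _ n).pow q).mul (fmod_modEq _ n)).add
                  ((fmod_modEq _ n).mul (geom_congr (fmod_modEq _ n) q))
            _ = ba ^ m * rb + bb * geom ba m := by
                rw [hm2, show 2 * q + 1 = 2 * q + 1 from rfl]
                have h1 : geom ba (2 * q + 1) = geom ba (2 * q) + ba ^ (2 * q) := rfl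
                rw [h1, geom_double, pow_succ, pow_two_mul']; ring

-- ===== VERDICT (by name: the statement is the Claim_ definition above) =====
theorem polypow_spec : Claim_equal_polypow := by
  intro a b p ncards _ hpre
  unfold Spec_polypow polypow_alt
  obtain ⟨hp, hn⟩ := hpre
  rcases eq_or_lt_of_le hp with h0 | h0
  · rw [polypow, polypowLoop]; simp [← h0]
  · have hm : p = ((p.toNat : Nat) : Int) := by omega
    have h1 : 1 ≤ p.toNat := by omega
    have hn0 : ncards ≠ 0 := hn.resolve_right (by omega)
    rw [hm, polypow_closed ncards p.toNat h1 a b,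
      polypowLoop_closed ncards p.toNat h1 1 0 a b]
    simp
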